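-- pv_equiv track=rewrite | github.com/GustavoPinto070/L_solutions | L06/ex6.py | num_para_seq_cod_pro
-- ===== SOURCE A (Python) =====
-- def num_para_seq_cod_pro(n:int)->tuple:
--     resultado = ()
--     while n > 0:
--         ultimo_digito = n % 10
--         n //= 10
--         ultimo_digito=(ultimo_digito+2*(-1)**(ultimo_digito%2))%10 # lines 6 -> 10
--         resultado += (ultimo_digito,)
--     return resultado[::-1]
-- ===== SOURCE B (Python) =====
-- def num_para_seq_cod_pro(n: int) -> tuple:
--     if n <= 0:
--         return ()
--     return tuple((d + 2) % 10 if d % 2 == 0 else (d - 2) % 10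
--                  for d in (ord(c) - 48 for c in str(n)))
-- ===== Notes on version B (the rewrite author's own statement) =====
-- stated objective: idiomatic
-- what changed: B traverses the decimal string of n most-significant-digit first with a generator expression instead of A's arithmetic digit-extraction loop that builds the tuple least-significant-first and reverses it, and replaces the sign-power parity trick by an explicit even/odd conditional.
import Mathlib
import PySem

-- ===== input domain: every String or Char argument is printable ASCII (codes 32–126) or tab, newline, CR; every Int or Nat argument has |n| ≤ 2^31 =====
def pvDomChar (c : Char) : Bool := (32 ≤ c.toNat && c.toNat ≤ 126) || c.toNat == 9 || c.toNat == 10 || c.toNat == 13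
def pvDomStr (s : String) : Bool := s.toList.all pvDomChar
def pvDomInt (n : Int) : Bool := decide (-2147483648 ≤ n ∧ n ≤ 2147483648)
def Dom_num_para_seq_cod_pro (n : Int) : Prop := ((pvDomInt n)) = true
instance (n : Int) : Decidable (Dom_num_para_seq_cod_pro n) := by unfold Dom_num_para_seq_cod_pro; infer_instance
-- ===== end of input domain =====

-- B replaces A's arithmetic digit-extraction loop (build least-significant-first, then reverse)
-- by a forward traversal of str(n) with an explicit even/odd conditional: idiomatic, same cost.


-- ===== PORT A =====
-- the while loop: resultado accumulates transformed digits least-significant-first;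
-- (-1)**(d%2) is ported as (-1 : Int) ^ (mod d 2).toNat — exact, since mod d 2 ∈ {0,1}.
def pvNumLoop (n : Int) (resultado : List Int) : List Int :=
  if h : n > 0 then
    let ultimo_digito := PySem.Int.mod n 10
    let n' := PySem.Int.floordiv n 10
    pvNumLoop n'
      (resultado ++ [PySem.Int.mod (ultimo_digito + 2 * (-1 : Int) ^ (PySem.Int.mod ultimo_digito 2).toNat) 10])
  else resultado
termination_by n.toNat
decreasing_by
  have h10 : PySem.Int.floordiv n 10 = n / 10 := PySem.Int.floordiv_eq_ediv_of_pos (by omega)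
  have hle := Int.ediv_le_self 10 (le_of_lt h)
  have hne : n / 10 ≠ n := by
    intro he
    have := Int.mul_ediv_add_emod n 10
    have hm : 0 ≤ n % 10 := Int.emod_nonneg n (by norm_num)
    omega
  have h2 : 0 ≤ n / 10 := Int.ediv_nonneg (by omega) (by omega)
  simp only [h10]
  omega

-- resultado[::-1]: step -1 never yields none (slice? is none only for step 0)
def num_para_seq_cod_pro (n : Int) : List Int :=
  (PySem.List.slice? (pvNumLoop n []) none none (-1)).getD []

-- ===== PORT B =====
def pvCodeDigit (d : Int) : Int :=
  if PySem.Int.mod d 2 = 0 then PySem.Int.mod (d + 2) 10 else PySem.Int.mod (d - 2) 10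

def num_para_seq_cod_pro_alt (n : Int) : List Int :=
  if n ≤ 0 then []
  else (PySem.Int.toStr n).toList.map (fun c => pvCodeDigit ((c.toNat : Int) - 48))

-- ===== PRECONDITION & SPEC =====
def Spec_num_para_seq_cod_pro (n : Int) (out : List Int) : Prop := out = num_para_seq_cod_pro_alt n
instance (n : Int) (out : List Int) : Decidable (Spec_num_para_seq_cod_pro n out) := by unfold Spec_num_para_seq_cod_pro; infer_instance

-- ===== CLAIM (what is proved, stated in full; the proofs are below) =====
def Claim_equal_num_para_seq_cod_pro : Prop := ∀ (n : Int), Dom_num_para_seq_cod_pro n → Spec_num_para_seq_cod_pro n (num_para_seq_cod_pro n)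

-- ===== LEMMAS AND PROOFS =====

theorem pvNumLoop_neg (n : Int) (acc : List Int) (h : ¬ n > 0) : pvNumLoop n acc = acc := by
  rw [pvNumLoop.eq_def]
  simp [h]

theorem pvNumLoop_pos (n : Int) (acc : List Int) (h : n > 0) :
    pvNumLoop n acc = pvNumLoop (PySem.Int.floordiv n 10)
      (acc ++ [PySem.Int.mod (PySem.Int.mod n 10
        + 2 * (-1 : Int) ^ (PySem.Int.mod (PySem.Int.mod n 10) 2).toNat) 10]) := by
  conv_lhs => rw [pvNumLoop.eq_def]
  simp [h]

theorem pvFloordiv_toNat_lt (n : Int) (h : 0 < n) :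
    (PySem.Int.floordiv n 10).toNat < n.toNat := by
  rw [PySem.Int.floordiv_eq_ediv_of_pos (by omega)]
  have hle := Int.ediv_le_self 10 (le_of_lt h)
  have hne : n / 10 ≠ n := by
    intro he
    have := Int.mul_ediv_add_emod n 10
    have hm : 0 ≤ n % 10 := Int.emod_nonneg n (by norm_num)
    omega
  have hnn : 0 ≤ n / 10 := Int.ediv_nonneg (by omega) (by omega)
  omega

-- A's transform of a single digit equals B's transform of its character
theorem pvDigit_eq (m : Nat) (hm : m < 10) :
    PySem.Int.mod ((m : Int) + 2 * (-1 : Int) ^ (PySem.Int.mod (m : Int) 2).toNat) 10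
      = pvCodeDigit (((Nat.digitChar m).toNat : Int) - 48) := by
  interval_cases m <;> decide

theorem pvNumLoop_append (k : Nat) : ∀ (n : Int), n.toNat ≤ k → ∀ acc : List Int,
    pvNumLoop n acc = acc ++ pvNumLoop n [] := by
  induction k with
  | zero =>
    intro n hn acc
    have h : ¬ n > 0 := by omega
    rw [pvNumLoop_neg n acc h, pvNumLoop_neg n [] h, List.append_nil]
  | succ k ih =>
    intro n hn acc
    by_cases h : n > 0
    · have hlt := pvFloordiv_toNat_lt n h
      rw [pvNumLoop_pos n acc h, pvNumLoop_pos n [] h]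
      rw [ih _ (by omega), ih _ (by omega) ([] ++ [_])]
      simp
    · rw [pvNumLoop_neg n acc h, pvNumLoop_neg n [] h, List.append_nil]

theorem pvNumLoop_eq_aux (k : Nat) : ∀ (n : Int), n.toNat ≤ k → 0 < n →
    pvNumLoop n [] = ((Nat.toDigits 10 n.toNat).map
      (fun c => pvCodeDigit ((c.toNat : Int) - 48))).reverse := by
  induction k with
  | zero => intro n hn h; omega
  | succ k ih =>
    intro n hn h
    have hmod : PySem.Int.mod n 10 = ((n.toNat % 10 : Nat) : Int) := by
      rw [PySem.Int.mod_eq_emod_of_pos (by omega)]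
      omega
    have hdiv : PySem.Int.floordiv n 10 = ((n.toNat / 10 : Nat) : Int) := by
      rw [PySem.Int.floordiv_eq_ediv_of_pos (by omega)]
      omega
    have hlt := pvFloordiv_toNat_lt n h
    rw [pvNumLoop_pos n [] h, List.nil_append,
      pvNumLoop_append k _ (by omega), Nat.toDigits_eq_if (by omega : 1 < 10)]
    by_cases hsmall : n.toNat < 10
    · have hz : pvNumLoop (PySem.Int.floordiv n 10) [] = [] := by
        apply pvNumLoop_neg
        rw [hdiv]
        omega
      have hself : n.toNat % 10 = n.toNat := Nat.mod_eq_of_lt hsmall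
      simp only [hsmall, if_true, hz, List.append_nil, List.map_cons, List.map_nil,
        List.reverse_cons, List.reverse_nil, List.nil_append, hmod, hself]
      rw [pvDigit_eq n.toNat hsmall]
    · have hpos' : (0 : Int) < PySem.Int.floordiv n 10 := by
        rw [hdiv]; omega
      have hih := ih (PySem.Int.floordiv n 10) (by omega) hpos'
      rw [hdiv] at hih
      simp only [Int.toNat_natCast] at hih
      rw [← hdiv, hih] at *
      simp only [hsmall, if_false, hmod, List.map_append, List.reverse_append,
        List.map_cons, List.map_nil, List.reverse_cons, List.reverse_nil, List.nil_append]
      rw [pvDigit_eq (n.toNat % 10) (by omega)]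

theorem pvNumLoop_eq (n : Int) (hn : 0 < n) :
    pvNumLoop n [] = ((Nat.toDigits 10 n.toNat).map
      (fun c => pvCodeDigit ((c.toNat : Int) - 48))).reverse :=
  pvNumLoop_eq_aux n.toNat n le_rfl hn

-- ===== VERDICT (by name: the statement is the Claim_ definition above) =====
theorem num_para_seq_cod_pro_spec : Claim_equal_num_para_seq_cod_pro := by
  intro n _
  unfold Spec_num_para_seq_cod_pro num_para_seq_cod_pro num_para_seq_cod_pro_alt
  rw [PySem.List.slice?_none_none_neg_one]
  by_cases hn : n ≤ 0
  · rw [pvNumLoop_neg n [] (by omega)]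
    simp [hn]
  · have hpos : 0 < n := by omega
    have hlist : (PySem.Int.toStr n).toList = Nat.toDigits 10 n.toNat := by
      rw [PySem.Int.toList_toStr]
      unfold PySem.Int.toChars
      have h : ¬ n < 0 := by omega
      simp [h]
    simp only [hn, if_false, Option.getD_some]
    rw [hlist, pvNumLoop_eq n hpos, List.reverse_reverse]
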